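-- pv_equiv track=rewrite | github.com/yashkulkarni322/PoCs | finance_rag_system/services/document_processor.py | _parse_bank_statement
-- ===== SOURCE A (Python) =====
-- def _parse_bank_statement(text: str) -> tuple:
--     """Parse bank statement to extract headers and transaction rows"""
--     lines = text.split('\n')
--
--     # Extract account info as header
--     account_info = []
--     transaction_lines = []
--     in_transactions = False
--
--     for line in lines:
--         line = line.strip()
--         if not line:
--             continue
--
--         # Look for transaction header
--         if ('Branch Name' in line and 'Transaction Date' in line) or in_transactions:
--             in_transactions = True
--             if ('Branch Name' in line or 'Debit' in line or 'Credit' in line):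
--                 continue  # Skip header row
--             transaction_lines.append(line)
--         elif not in_transactions and any(keyword in line for keyword in
--             ['Account', 'Statement From', 'IFSC', 'MICR', 'Currency']):
--             account_info.append(line)
--
--     # Create headers
--     if account_info:
--         headers = "Bank Statement Summary:\n" + '\n'.join(account_info[:5])
--     else:
--         headers = "Transaction Headers: Date | Type | Description | Debit | Credit | Balance"
--
--     return headers, transaction_lines
-- ===== SOURCE B (Python) =====
-- def _parse_bank_statement(text: str) -> tuple:
--     """Parse bank statement headers/transactions via a cleaned-lines + split-index decomposition."""
--     cleaned = [s for s in (ln.strip() for ln in text.split('\n')) if s]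
--
--     idx = next((i for i, line in enumerate(cleaned)
--                 if 'Branch Name' in line and 'Transaction Date' in line),
--                len(cleaned))
--
--     account_info = [line for line in cleaned[:idx]
--                     if any(k in line for k in
--                            ['Account', 'Statement From', 'IFSC', 'MICR', 'Currency'])]
--     transaction_lines = [line for line in cleaned[idx:]
--                          if not ('Branch Name' in line or 'Debit' in line or 'Credit' in line)]
--
--     if account_info:
--         headers = "Bank Statement Summary:\n" + '\n'.join(account_info[:5])
--     else:
--         headers = "Transaction Headers: Date | Type | Description | Debit | Credit | Balance"
--
--     return headers, transaction_lines
-- ===== Notes on version B (the rewrite author's own statement) =====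
-- stated objective: simpler
-- what changed: Replaced A's single stateful loop with an in_transactions flag by a three-stage decomposition: clean the lines, find the index of the first header row, then build account_info and transaction_lines as filters over the two halves.
import Mathlib
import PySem

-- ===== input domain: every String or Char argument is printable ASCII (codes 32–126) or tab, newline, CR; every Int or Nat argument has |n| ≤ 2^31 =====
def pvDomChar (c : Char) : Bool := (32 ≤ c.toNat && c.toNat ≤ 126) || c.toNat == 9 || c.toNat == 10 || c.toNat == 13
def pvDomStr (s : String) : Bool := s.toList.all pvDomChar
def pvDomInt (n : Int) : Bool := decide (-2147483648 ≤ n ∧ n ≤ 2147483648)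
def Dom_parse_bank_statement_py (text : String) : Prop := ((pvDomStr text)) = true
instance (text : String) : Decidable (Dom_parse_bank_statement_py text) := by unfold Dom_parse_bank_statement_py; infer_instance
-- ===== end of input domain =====

-- B differs from A by decomposition: instead of A's stateful single loop with an
-- `in_transactions` flag, B cleans the lines, finds the split index of the header row,
-- and builds both lists with filters over the two halves (objective: simpler).

-- ===== PORT A =====
-- any(keyword in line for keyword in ['Account', 'Statement From', 'IFSC', 'MICR', 'Currency'])
def pvKeyword (line : String) : Bool :=
  PySem.Str.isIn "Account" line || PySem.Str.isIn "Statement From" line ||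
  PySem.Str.isIn "IFSC" line || PySem.Str.isIn "MICR" line || PySem.Str.isIn "Currency" line

-- the body of A's `for line in lines:` loop; state = (in_transactions, account_info, transaction_lines)
def pvStepA (st : Bool × List String × List String) (raw : String) : Bool × List String × List String :=
  let line := PySem.Str.strip raw
  if line == "" then st
  else
    match st with
    | (it, acc, tr) =>
      if (PySem.Str.isIn "Branch Name" line && PySem.Str.isIn "Transaction Date" line) || it then
        if PySem.Str.isIn "Branch Name" line || PySem.Str.isIn "Debit" line ||
           PySem.Str.isIn "Credit" line then
          (true, acc, tr)  -- skip header row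
        else
          (true, acc, tr ++ [line])
      else if !it && pvKeyword line then
        (it, acc ++ [line], tr)
      else
        (it, acc, tr)

def parse_bank_statement_py (text : String) : String × List String :=
  let lines := (PySem.Str.split? text "\n").getD []   -- sep "\n" ≠ "": split? is always `some` here
  let res := lines.foldl pvStepA (false, [], [])
  let account_info := res.2.1
  let transaction_lines := res.2.2
  let headers :=
    if account_info ≠ [] then
      "Bank Statement Summary:\n" ++
        PySem.Str.join "\n" (PySem.List.slice account_info none (some 5))
    else
      "Transaction Headers: Date | Type | Description | Debit | Credit | Balance"
  (headers, transaction_lines)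

-- ===== PORT B =====
def pvIsHeaderRow (line : String) : Bool :=
  PySem.Str.isIn "Branch Name" line && PySem.Str.isIn "Transaction Date" line

def pvSkipTx (line : String) : Bool :=
  PySem.Str.isIn "Branch Name" line || PySem.Str.isIn "Debit" line || PySem.Str.isIn "Credit" line

def parse_bank_statement_py_alt (text : String) : String × List String :=
  let cleaned := ((((PySem.Str.split? text "\n").getD []).map PySem.Str.strip).filter
                   (fun s => !(s == "")))
  let idx := match List.findIdx? pvIsHeaderRow cleaned with
             | some i => i
             | none => List.length cleaned
  let account_info := List.filter pvKeyword (List.take idx cleaned)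
  let transaction_lines := List.filter (fun l => !pvSkipTx l) (List.drop idx cleaned)
  let headers :=
    if account_info ≠ [] then
      "Bank Statement Summary:\n" ++
        PySem.Str.join "\n" (PySem.List.slice account_info none (some 5))
    else
      "Transaction Headers: Date | Type | Description | Debit | Credit | Balance"
  (headers, transaction_lines)

-- ===== PRECONDITION & SPEC =====
def Spec_parse_bank_statement_py (text : String) (out : String × List String) : Prop := out = parse_bank_statement_py_alt text
instance (text : String) (out : String × List String) : Decidable (Spec_parse_bank_statement_py text out) := by unfold Spec_parse_bank_statement_py; infer_instance

-- ===== CLAIM (what is proved, stated in full; the proofs are below) =====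
def Claim_equal_parse_bank_statement_py : Prop := ∀ (text : String), Dom_parse_bank_statement_py text → Spec_parse_bank_statement_py text (parse_bank_statement_py text)

-- ===== LEMMAS AND PROOFS =====

-- A's step on an already-stripped nonempty line, phrased with the named predicates
def pvStepC (st : Bool × List String × List String) (line : String) : Bool × List String × List String :=
  match st with
  | (it, acc, tr) =>
    if pvIsHeaderRow line || it then
      if pvSkipTx line then (true, acc, tr)
      else (true, acc, tr ++ [line])
    else if !it && pvKeyword line then (it, acc ++ [line], tr)
    else (it, acc, tr)

theorem pvStepA_eq (st : Bool × List String × List String) (raw : String) :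
    pvStepA st raw =
      if (PySem.Str.strip raw == "") then st else pvStepC st (PySem.Str.strip raw) := by
  rfl

theorem foldl_stepA_eq_stepC (lines : List String) (st : Bool × List String × List String) :
    lines.foldl pvStepA st =
      ((lines.map PySem.Str.strip).filter (fun s => !(s == ""))).foldl pvStepC st := by
  induction lines generalizing st with
  | nil => rfl
  | cons l ls ih =>
    rw [List.foldl_cons, pvStepA_eq]
    cases h : (PySem.Str.strip l == "") <;> simp [h, ih]

theorem foldl_stepC_true (ls : List String) (acc tr : List String) :
    ls.foldl pvStepC (true, acc, tr) = (true, acc, tr ++ ls.filter (fun l => !pvSkipTx l)) := by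
  induction ls generalizing tr with
  | nil => simp
  | cons l ls ih =>
    cases h : pvSkipTx l <;> simp [pvStepC, h, ih]

-- the split-index of B, as a function
def pvIdx (ls : List String) : Nat :=
  match List.findIdx? pvIsHeaderRow ls with
  | some i => i
  | none => List.length ls

theorem pvIdx_cons_pos (l : String) (ls : List String) (h : pvIsHeaderRow l = true) :
    pvIdx (l :: ls) = 0 := by
  simp [pvIdx, List.findIdx?_cons, h]

theorem pvIdx_cons_neg (l : String) (ls : List String) (h : pvIsHeaderRow l = false) :
    pvIdx (l :: ls) = pvIdx ls + 1 := by
  simp only [pvIdx, List.findIdx?_cons, h]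
  cases List.findIdx? pvIsHeaderRow ls <;> simp

theorem header_skips (l : String) (h : pvIsHeaderRow l = true) : pvSkipTx l = true := by
  simp only [pvIsHeaderRow, Bool.and_eq_true] at h
  simp only [pvSkipTx, h.1, Bool.true_or]

theorem foldl_stepC_false (ls : List String) (acc tr : List String) :
    ls.foldl pvStepC (false, acc, tr) =
      (ls.any pvIsHeaderRow,
       acc ++ (ls.take (pvIdx ls)).filter pvKeyword,
       tr ++ (ls.drop (pvIdx ls)).filter (fun l => !pvSkipTx l)) := by
  induction ls generalizing acc tr with
  | nil => simp [pvIdx]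
  | cons l ls ih =>
    cases h : pvIsHeaderRow l with
    | true =>
      have hskip : pvSkipTx l = true := header_skips l h
      simp [pvStepC, h, hskip, foldl_stepC_true, pvIdx_cons_pos l ls h]
    | false =>
      cases hk : pvKeyword l <;>
        simp [pvStepC, h, hk, pvIdx_cons_neg l ls h, ih]

-- ===== VERDICT (by name: the statement is the Claim_ definition above) =====
theorem parse_bank_statement_py_spec : Claim_equal_parse_bank_statement_py := by
  intro text _
  show parse_bank_statement_py text = parse_bank_statement_py_alt text
  simp only [parse_bank_statement_py, parse_bank_statement_py_alt]
  rw [foldl_stepA_eq_stepC, foldl_stepC_false]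
  rfl
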